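-- pv_equiv track=rewrite | github.com/GundalaNikhil/DSA | dsa-problems/Heaps/testcases/tc_generators/generate_hep006.py | solve
-- ===== SOURCE A (Python) =====
-- import heapq
--
-- def solve(n, E, tasks):
--     # Tasks: list of [d, g]
--     s1 = []
--     s2 = []
--
--     for d, g in tasks:
--         if g >= d:
--             s1.append((d, g))
--         else:
--             s2.append((d, g))
--
--     # Process S1: Sort by d ASC
--     s1.sort(key=lambda x: x[0])
--
--     count = 0
--     current_E = E
--
--     for d, g in s1:
--         if current_E >= d:
--             current_E = current_E - d + g
--             count += 1
--         else:
--             # Cannot process this task, and since sorted by d, cannot process any subsequent S1 task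
--             # (assuming they require even more d, and we rely on tasks to boost E)
--             # Actually, could there be a task with same d but we just don't have enough?
--             # Yes. We stop.
--             # Wait, strictly speaking, if we skip this (d, g), we don't gain g-d.
--             # Next task has d' >= d. Since current_E < d <= d', we fail next too.
--             break
--
--     # Process S2: Sort by g DESC
--     s2.sort(key=lambda x: x[1], reverse=True)
--
--     # Max-Heap for Costs (d - g). We store negative for min-heap simulating max-heap
--     pq = []
--
--     for d, g in s2:
--         cost = d - g
--         if current_E >= d:
--             # Can execute
--             current_E -= cost
--             heapq.heappush(pq, -cost)
--             count += 1
--         else: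
--             # Regret logic
--             if pq:
--                 max_cost = -pq[0]
--                 if max_cost > cost:
--                     # Check if swapping is valid
--                     # We refund max_cost.
--                     temp_E = current_E + max_cost
--                     if temp_E >= d:
--                         # Swap
--                         heapq.heappop(pq)
--                         heapq.heappush(pq, -cost)
--                         current_E = temp_E - cost
--                         # Count doesn't change (one out, one in)
--
--     return count
-- ===== SOURCE B (Python) =====
-- def solve(n, E, tasks):
--     s1 = [t for t in tasks if t[1] >= t[0]]
--     s2 = [t for t in tasks if t[1] < t[0]]
--     s1.sort(key=lambda x: x[0])
--     count = 0
--     for d, g in s1: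
--         if E < d:
--             break
--         E += g - d
--         count += 1
--     s2.sort(key=lambda x: x[1], reverse=True)
--     costs = []
--     for d, g in s2:
--         cost = d - g
--         if E >= d:
--             E -= cost
--             costs.append(cost)
--             count += 1
--         elif costs:
--             max_cost = max(costs)
--             if max_cost > cost and E + max_cost >= d:
--                 costs.remove(max_cost)
--                 costs.append(cost)
--                 E += max_cost - cost
--     return count
-- ===== Notes on version B (the rewrite author's own statement) =====
-- stated objective: simpler
-- what changed: The heapq max-heap regret bookkeeping is replaced by a plain list of costs queried with max() and updated with remove()/append(), and the s1/s2 partition is built by two comprehensions instead of an append loop; no heapq at all.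
import Mathlib
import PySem

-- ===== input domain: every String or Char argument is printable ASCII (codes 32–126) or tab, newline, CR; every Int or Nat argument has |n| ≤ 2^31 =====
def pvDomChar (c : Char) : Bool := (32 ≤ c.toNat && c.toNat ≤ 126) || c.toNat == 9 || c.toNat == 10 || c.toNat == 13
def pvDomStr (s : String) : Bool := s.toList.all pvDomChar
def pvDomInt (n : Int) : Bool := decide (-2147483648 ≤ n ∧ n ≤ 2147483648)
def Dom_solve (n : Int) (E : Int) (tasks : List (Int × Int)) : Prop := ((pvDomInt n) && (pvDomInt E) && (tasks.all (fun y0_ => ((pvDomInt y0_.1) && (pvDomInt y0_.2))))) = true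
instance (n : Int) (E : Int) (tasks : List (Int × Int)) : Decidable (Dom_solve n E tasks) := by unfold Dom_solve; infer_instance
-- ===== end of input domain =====

-- B replaces A's heapq max-heap bookkeeping by a plain list queried with max() and
-- updated with remove()/append(): simpler (no heap code), same return value.

-- ===== PORT A =====
-- Port of CPython's heapq (list-based binary min-heap), used by A via
-- heappush / heappop / pq[0].  Exact step-for-step transliteration of
-- heapq._siftdown / _siftup / heappush / heappop from CPython's Lib/heapq.py.

-- _siftdown(heap, 0, pos): bubble `newitem` up from index pos; each step moves the
-- parent down into the hole; the final resting index is assigned `newitem`.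
def pvSiftdown (h : List Int) (newitem : Int) : Nat → List Int
  | 0 => h.set 0 newitem
  | pos + 1 =>
    let parentpos := pos / 2            -- ((pos+1) - 1) >> 1
    let parent := h.getD parentpos 0
    if newitem < parent then
      pvSiftdown (h.set (pos + 1) parent) newitem parentpos
    else
      h.set (pos + 1) newitem
  termination_by pos => pos
  decreasing_by omega

-- smaller-child choice of heapq._siftup's loop body
def pvChild (h : List Int) (pos : Nat) : Nat :=
  if 2 * pos + 2 < h.length ∧ ¬ (h.getD (2 * pos + 1) 0 < h.getD (2 * pos + 2) 0)
  then 2 * pos + 2 else 2 * pos + 1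

theorem pvChild_bounds (h : List Int) (pos : Nat) (hlt : 2 * pos + 1 < h.length) :
    pos < pvChild h pos ∧ pvChild h pos < h.length := by
  unfold pvChild; split <;> omega

-- _siftup(heap, pos): move the hole at pos down along smaller children to a leaf,
-- then _siftdown the newitem from that leaf (the heap[pos] = newitem write before
-- the final _siftdown is subsumed by pvSiftdown's final write of newitem).
def pvSiftup (h : List Int) (newitem : Int) (pos : Nat) : List Int :=
  if hlt : 2 * pos + 1 < h.length then
    pvSiftup (h.set pos (h.getD (pvChild h pos) 0)) newitem (pvChild h pos)
  else
    pvSiftdown (h.set pos newitem) newitem pos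
  termination_by h.length - pos
  decreasing_by
    simp only [List.length_set]
    have := pvChild_bounds h pos hlt
    omega

-- heappush(heap, item)
def pvHeappush (h : List Int) (item : Int) : List Int :=
  pvSiftdown (h ++ [item]) item h.length

-- heappop(heap), heap part only (A discards the returned minimum); called by A
-- only on a non-empty heap (guarded by `if pq:`), so getLast? never misses.
def pvHeappopHeap (h : List Int) : List Int :=
  let lastelt := h.getLast?.getD 0
  let rest := h.dropLast
  if rest.isEmpty then [] else pvSiftup (rest.set 0 lastelt) lastelt 0

-- the s1/s2 partition loop of A
def pvPartition (tasks : List (Int × Int)) : List (Int × Int) × List (Int × Int) :=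
  tasks.foldl (fun p t => if t.2 ≥ t.1 then (p.1 ++ [t], p.2) else (p.1, p.2 ++ [t])) ([], [])

-- the S1 loop of A (break returns the current state)
def pvLoop1 : List (Int × Int) → Int × Int → Int × Int
  | [], s => s
  | (d, g) :: rest, (count, curE) =>
    if curE ≥ d then pvLoop1 rest (count + 1, curE - d + g) else (count, curE)

-- the S2 loop of A
def pvLoop2 : List (Int × Int) → Int → Int → List Int → Int
  | [], count, _, _ => count
  | (d, g) :: rest, count, curE, pq =>
    let cost := d - g
    if curE ≥ d then
      pvLoop2 rest (count + 1) (curE - cost) (pvHeappush pq (-cost))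
    else
      if pq.isEmpty then pvLoop2 rest count curE pq
      else
        let maxCost := -(pq.getD 0 0)
        if maxCost > cost then
          let tempE := curE + maxCost
          if tempE ≥ d then
            pvLoop2 rest count (tempE - cost) (pvHeappush (pvHeappopHeap pq) (-cost))
          else pvLoop2 rest count curE pq
        else pvLoop2 rest count curE pq

def solve (n : Int) (E : Int) (tasks : List (Int × Int)) : Int :=
  let p := pvPartition tasks
  let s1 := PySem.List.sorted p.1 (fun x => x.1) false
  let st := pvLoop1 s1 (0, E)
  let s2 := PySem.List.sorted p.2 (fun x => x.2) true
  pvLoop2 s2 st.1 st.2 []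

-- ===== PORT B =====
-- the S1 loop of B
def pvLoop1b : List (Int × Int) → Int → Int → Int × Int
  | [], count, curE => (count, curE)
  | (d, g) :: rest, count, curE =>
    if curE < d then (count, curE)
    else pvLoop1b rest (count + 1) (curE + (g - d))

-- the S2 loop of B: costs is a plain list; max() / remove() / append()
def pvLoop2b : List (Int × Int) → Int → Int → List Int → Int
  | [], count, _, _ => count
  | (d, g) :: rest, count, curE, costs =>
    let cost := d - g
    if curE ≥ d then
      pvLoop2b rest (count + 1) (curE - cost) (costs ++ [cost])
    else
      if costs.isEmpty then pvLoop2b rest count curE costs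
      else
        let maxCost := (PySem.List.max? costs (fun x => x)).getD 0
        if maxCost > cost ∧ curE + maxCost ≥ d then
          pvLoop2b rest count (curE + maxCost - cost)
            (((PySem.List.remove? costs maxCost).getD []) ++ [cost])
        else pvLoop2b rest count curE costs

def solve_alt (n : Int) (E : Int) (tasks : List (Int × Int)) : Int :=
  let s1 := PySem.List.sorted (tasks.filter (fun t => t.2 ≥ t.1)) (fun x => x.1) false
  let st := pvLoop1b s1 0 E
  let s2 := PySem.List.sorted (tasks.filter (fun t => t.2 < t.1)) (fun x => x.2) true
  pvLoop2b s2 st.1 st.2 []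

-- ===== PRECONDITION & SPEC =====
def Spec_solve (n : Int) (E : Int) (tasks : List (Int × Int)) (out : Int) : Prop := out = solve_alt n E tasks
instance (n : Int) (E : Int) (tasks : List (Int × Int)) (out : Int) : Decidable (Spec_solve n E tasks out) := by unfold Spec_solve; infer_instance

-- ===== CLAIM (what is proved, stated in full; the proofs are below) =====
def Claim_equal_solve : Prop := ∀ (n : Int) (E : Int) (tasks : List (Int × Int)), Dom_solve n E tasks → Spec_solve n E tasks (solve n E tasks)

-- ===== LEMMAS AND PROOFS =====

theorem pvGetD_set (h : List Int) (i j : Nat) (a : Int) :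
    (h.set i a).getD j 0 = if i = j ∧ j < h.length then a else h.getD j 0 := by
  rcases Nat.lt_or_ge j h.length with hj | hj
  · by_cases hij : i = j
    · subst hij; simp [hj]
    · simp [List.getD_eq_getElem _ _ (by simpa using hj), hij]
  · have hj2 : ¬ j < (h.set i a).length := by simpa using Nat.not_lt.mpr hj
    simp [List.getD_eq_getElem?_getD, List.getElem?_eq_none (by simpa using hj),
      List.getElem?_eq_none (Nat.le_of_not_lt hj2)]
    omega

theorem pvPerm_cons_set (x a : Int) : ∀ (t : List Int) (k : Nat), k < t.length →
    (x :: t.set k a).Perm (a :: t.set k x)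
  | b :: t', 0, _ => by simpa using List.Perm.swap a x t'
  | b :: t', k+1, hk => by
    have ih := pvPerm_cons_set x a t' k (by simpa using hk)
    simp only [List.set_cons_succ]
    exact ((List.Perm.swap b x _).trans ((List.Perm.cons b ih).trans (List.Perm.swap a b _)))

-- (h.set i h[j]).set j x ~ h.set i x  for i ≠ j (both in range)
theorem pvPerm_set_set (x : Int) : ∀ (h : List Int) (i j : Nat), i ≠ j → i < h.length → j < h.length →
    ((h.set i (h.getD j 0)).set j x).Perm (h.set i x)
  | a :: t, 0, j+1, _, _, hj => by
    simp only [List.set_cons_succ, List.set_cons_zero, List.getD_cons_succ]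
    have hset : t.set j (t.getD j 0) = t := by
      rw [List.getD_eq_getElem _ _ (by simpa using hj)]
      exact List.set_getElem_self (by simpa using hj)
    exact (pvPerm_cons_set (t.getD j 0) x t j (by simpa using hj)).trans (by rw [hset])
  | a :: t, i+1, 0, _, hi, _ => by
    simp only [List.set_cons_succ, List.set_cons_zero, List.getD_cons_zero]
    exact pvPerm_cons_set x a t i (by simpa using hi)
  | a :: t, i+1, j+1, hij, hi, hj => by
    simp only [List.set_cons_succ, List.getD_cons_succ]
    exact List.Perm.cons a (pvPerm_set_set x t i j (by omega) (by simpa using hi) (by simpa using hj))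

theorem pvSiftdown_perm (x : Int) : ∀ (pos : Nat) (h : List Int), pos < h.length →
    (pvSiftdown h x pos).Perm (h.set pos x)
  | 0, h, _ => by simp [pvSiftdown]
  | pos + 1, h, hp => by
    rw [pvSiftdown]
    split
    · exact (pvSiftdown_perm x (pos / 2) (h.set (pos+1) (h.getD (pos/2) 0)) (by simp; omega)).trans
        (by simpa using pvPerm_set_set x h (pos+1) (pos/2) (by omega) hp (by omega))
    · exact List.Perm.refl _
  termination_by pos => pos
  decreasing_by omega

theorem pvSiftup_perm (x : Int) (h : List Int) (pos : Nat) (hp : pos < h.length) :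
    (pvSiftup h x pos).Perm (h.set pos x) := by
  rw [pvSiftup]
  split
  · rename_i hlt
    obtain ⟨hc1, hc2⟩ := pvChild_bounds h pos hlt
    exact (pvSiftup_perm x (h.set pos (h.getD (pvChild h pos) 0)) (pvChild h pos) (by simpa using hc2)).trans
      (pvPerm_set_set x h pos (pvChild h pos) (by omega) hp hc2)
  · exact (pvSiftdown_perm x pos (h.set pos x) (by simpa using hp)).trans (by simp)
  termination_by h.length - pos
  decreasing_by rename_i hlt; simp only [List.length_set]; have := pvChild_bounds h pos hlt; omega
def pvIsHeap (h : List Int) : Prop :=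
  ∀ j : Nat, 0 < j → j < h.length → h.getD ((j-1)/2) 0 ≤ h.getD j 0

theorem pvSiftdown_isHeap (x : Int) : ∀ (pos : Nat) (h : List Int), pos < h.length →
    (∀ j, 0 < j → j < h.length → j ≠ pos → h.getD ((j-1)/2) 0 ≤ h.getD j 0) →
    (∀ j, 0 < j → j < h.length → (j-1)/2 = pos → x ≤ h.getD j 0) →
    (∀ j, 0 < j → j < h.length → (j-1)/2 = pos → 0 < pos → h.getD ((pos-1)/2) 0 ≤ h.getD j 0) →
    pvIsHeap (pvSiftdown h x pos)
  | 0, h, hp, ha, hb, _ => by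
    intro j hj hlen
    simp only [pvSiftdown, List.length_set] at hlen ⊢
    rw [pvGetD_set, pvGetD_set]
    by_cases hpj : (j-1)/2 = 0
    · rw [if_pos ⟨hpj.symm, by omega⟩, if_neg (by omega)]
      exact hb j hj hlen hpj
    · rw [if_neg (by omega), if_neg (by omega)]
      exact ha j hj hlen (by omega)
  | pos + 1, h, hp, ha, hb, hc => by
    rw [pvSiftdown]
    split
    · rename_i hlt
      apply pvSiftdown_isHeap x (pos / 2) (h.set (pos+1) (h.getD (pos/2) 0)) (by simp; omega)
      · -- ha'
        intro j hj hlen hjpp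
        simp only [List.length_set] at hlen
        rw [pvGetD_set, pvGetD_set]
        by_cases hj1 : j = pos + 1
        · subst hj1
          rw [if_neg (by omega), if_pos ⟨rfl, by omega⟩]
          rw [show (pos + 1 - 1)/2 = pos/2 by omega]
        · by_cases hj2 : (j-1)/2 = pos + 1
          · rw [if_pos (by omega), if_neg (by omega)]
            have := hc j hj hlen (by omega) (by omega)
            rwa [show (pos + 1 - 1)/2 = pos/2 by omega] at this
          · rw [if_neg (by omega), if_neg (by omega)]
            exact ha j hj hlen (by omega)
      · -- hb'
        intro j hj hlen hpj
        simp only [List.length_set] at hlen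
        rw [pvGetD_set]
        by_cases hj1 : j = pos + 1
        · rw [if_pos (by omega)]; omega
        · rw [if_neg (by omega)]
          have h1 := ha j hj hlen (by omega)
          rw [hpj] at h1
          omega
      · -- hc'
        intro j hj hlen hpj hpp
        simp only [List.length_set] at hlen
        have hgl : (pos/2 - 1)/2 < pos/2 := by omega
        have hpalen : pos/2 < h.length := by omega
        have hpar := ha (pos/2) hpp hpalen (by omega)
        rw [pvGetD_set, pvGetD_set]
        rw [if_neg (by omega)]
        by_cases hj1 : j = pos + 1
        · rw [if_pos (by omega)]
          omega
        · rw [if_neg (by omega)]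
          have h1 := ha j hj hlen (by omega)
          rw [hpj] at h1
          omega
    · rename_i hge
      intro j hj hlen
      simp only [List.length_set] at hlen
      rw [pvGetD_set, pvGetD_set]
      by_cases hj1 : j = pos + 1
      · subst hj1
        rw [if_neg (by omega), if_pos ⟨rfl, by omega⟩]
        rw [show (pos + 1 - 1)/2 = pos/2 by omega]
        omega
      · by_cases hj2 : (j-1)/2 = pos + 1
        · rw [if_pos (by omega), if_neg (by omega)]
          exact hb j hj hlen (by omega)
        · rw [if_neg (by omega), if_neg (by omega)]
          exact ha j hj hlen (by omega)
  termination_by pos => pos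
  decreasing_by omega
theorem pvChild_min (h : List Int) (pos : Nat) (hlt : 2*pos+1 < h.length) :
    ∀ j, 0 < j → j < h.length → (j-1)/2 = pos → h.getD (pvChild h pos) 0 ≤ h.getD j 0 := by
  intro j hj0 hj hpj
  have hj2 : j = 2*pos+1 ∨ j = 2*pos+2 := by omega
  unfold pvChild
  by_cases hcond : 2*pos+2 < h.length ∧ ¬ h.getD (2*pos+1) 0 < h.getD (2*pos+2) 0
  · rw [if_pos hcond]
    rcases hj2 with rfl | rfl
    · exact Int.not_lt.mp hcond.2
    · exact le_refl _
  · rw [if_neg hcond]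
    rcases hj2 with rfl | rfl
    · exact le_refl _
    · rcases Decidable.not_and_iff_not_or_not.mp hcond with h1 | h1
      · omega
      · rw [Decidable.not_not] at h1; omega

theorem pvSiftup_isHeap (x : Int) (h : List Int) (pos : Nat) (hp : pos < h.length)
    (ha : ∀ j, 0 < j → j < h.length → j ≠ pos → (j-1)/2 ≠ pos → h.getD ((j-1)/2) 0 ≤ h.getD j 0)
    (hc : ∀ j, 0 < j → j < h.length → (j-1)/2 = pos → 0 < pos → h.getD ((pos-1)/2) 0 ≤ h.getD j 0) :
    pvIsHeap (pvSiftup h x pos) := by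
  rw [pvSiftup]
  split
  · rename_i hlt
    obtain ⟨hc1, hc2⟩ := pvChild_bounds h pos hlt
    have hpc : (pvChild h pos - 1)/2 = pos := by unfold pvChild; split <;> omega
    apply pvSiftup_isHeap x (h.set pos (h.getD (pvChild h pos) 0)) (pvChild h pos) (by simpa using hc2)
    · -- ha'
      intro j hj hlen hjc hpjc
      simp only [List.length_set] at hlen
      rw [pvGetD_set, pvGetD_set]
      by_cases hj1 : j = pos
      · rw [if_neg (by omega), if_pos ⟨hj1.symm, by omega⟩, hj1]
        exact hc (pvChild h pos) (by omega) hc2 hpc (by omega)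
      · by_cases hj2 : (j-1)/2 = pos
        · rw [if_pos ⟨hj2.symm, by omega⟩, if_neg (by omega)]
          exact pvChild_min h pos hlt j hj hlen hj2
        · rw [if_neg (by omega), if_neg (by omega)]
          exact ha j hj hlen hj1 hj2
    · -- hc'
      intro j hj hlen hpj hcpos
      simp only [List.length_set] at hlen
      rw [pvGetD_set, pvGetD_set, if_pos ⟨by omega, by omega⟩, if_neg (by omega)]
      have h1 := ha j hj hlen (by omega) (by omega)
      rwa [hpj] at h1
  · rename_i hge
    apply pvSiftdown_isHeap x pos (h.set pos x) (by simpa using hp)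
    · intro j hj hlen hjp
      simp only [List.length_set] at hlen
      rw [pvGetD_set, pvGetD_set, if_neg (by omega), if_neg (by omega)]
      exact ha j hj hlen hjp (by omega)
    · intro j hj hlen hpj
      simp only [List.length_set] at hlen
      omega
    · intro j hj hlen hpj _
      simp only [List.length_set] at hlen
      omega
  termination_by h.length - pos
  decreasing_by simp only [List.length_set]; omega
theorem pvHeap_root_le (h : List Int) (hh : pvIsHeap h) : ∀ j, j < h.length → h.getD 0 0 ≤ h.getD j 0 := by
  intro j
  induction j using Nat.strong_induction_on with
  | _ j ih =>
    intro hj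
    rcases Nat.eq_zero_or_pos j with rfl | hj0
    · exact le_refl _
    · exact le_trans (ih ((j-1)/2) (by omega) (by omega)) (hh j hj0 hj)

theorem pvHeap_root_le_mem (h : List Int) (hh : pvIsHeap h) (x : Int) (hx : x ∈ h) :
    h.getD 0 0 ≤ x := by
  obtain ⟨j, hj, rfl⟩ := List.mem_iff_getElem.mp hx
  rw [← List.getD_eq_getElem h 0 hj]
  exact pvHeap_root_le h hh j hj

theorem pvGetD_zero_mem (h : List Int) (hne : h ≠ []) : h.getD 0 0 ∈ h := by
  cases h with
  | nil => exact absurd rfl hne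
  | cons a t => simp

theorem pvHeappush_perm (h : List Int) (x : Int) : (pvHeappush h x).Perm (x :: h) := by
  unfold pvHeappush
  exact (pvSiftdown_perm x h.length (h ++ [x]) (by simp)).trans
    (by rw [List.set_append_right _ _ (le_refl _)]; simp)

theorem pvGetD_append_lt (h : List Int) (x : Int) (j : Nat) (hj : j < h.length) :
    (h ++ [x]).getD j 0 = h.getD j 0 := by
  rw [List.getD_eq_getElem _ _ (by simp; omega), List.getD_eq_getElem _ _ hj,
    List.getElem_append_left hj]

theorem pvHeappush_isHeap (h : List Int) (x : Int) (hh : pvIsHeap h) : pvIsHeap (pvHeappush h x) := by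
  unfold pvHeappush
  apply pvSiftdown_isHeap x h.length (h ++ [x]) (by simp)
  · intro j hj hlen hjp
    simp only [List.length_append, List.length_cons, List.length_nil] at hlen
    rw [pvGetD_append_lt _ _ _ (by omega), pvGetD_append_lt _ _ _ (by omega)]
    exact hh j hj (by omega)
  · intro j hj hlen hpj
    simp only [List.length_append, List.length_cons, List.length_nil] at hlen
    omega
  · intro j hj hlen hpj
    simp only [List.length_append, List.length_cons, List.length_nil] at hlen
    omega
theorem pvGetD_dropLast (h : List Int) (j : Nat) (hj : j < h.dropLast.length) :
    h.dropLast.getD j 0 = h.getD j 0 := by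
  rw [List.getD_eq_getElem _ _ hj, List.getD_eq_getElem _ _ (by simp at hj ⊢; omega),
    List.getElem_dropLast]

theorem pvHeappopHeap_perm (h : List Int) (hne : h ≠ []) : (pvHeappopHeap h).Perm h.tail := by
  unfold pvHeappopHeap
  simp only []
  split
  · rename_i hemp
    cases h with
    | nil => exact absurd rfl hne
    | cons a t =>
      cases t with
      | nil => exact List.Perm.refl _
      | cons b t' => simp at hemp
  · rename_i hemp
    rw [List.isEmpty_iff] at hemp
    have hlen : 0 < (h.dropLast.set 0 (h.getLast?.getD 0)).length := by
      have := List.length_pos_iff.mpr hemp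
      simp at this ⊢
      omega
    refine (pvSiftup_perm _ _ _ hlen).trans ?_
    rw [List.set_set]
    cases h with
    | nil => exact absurd rfl hne
    | cons a t =>
      cases t with
      | nil => simp at hemp
      | cons b t' =>
        have htne : (b :: t') ≠ [] := by simp
        rw [List.getLast?_cons_cons, List.getLast?_eq_some_getLast htne]
        simp only [List.dropLast_cons_of_ne_nil htne, List.set_cons_zero, List.tail_cons,
          Option.getD_some]
        exact ((List.perm_append_singleton _ _).symm.trans
          (by rw [List.dropLast_append_getLast htne])).symm.symm
theorem pvHeappopHeap_isHeap (h : List Int) (hh : pvIsHeap h) : pvIsHeap (pvHeappopHeap h) := by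
  unfold pvHeappopHeap
  simp only []
  split
  · intro j hj hlen
    simp at hlen
  · rename_i hemp
    rw [List.isEmpty_iff] at hemp
    have hlen : 0 < (h.dropLast.set 0 (h.getLast?.getD 0)).length := by
      have := List.length_pos_iff.mpr hemp
      simp at this ⊢
      omega
    apply pvSiftup_isHeap _ _ _ hlen
    · intro j hj hjl hjne hpne
      simp only [List.length_set] at hjl
      rw [pvGetD_set, pvGetD_set, if_neg (by omega), if_neg (by omega),
        pvGetD_dropLast _ _ (by omega), pvGetD_dropLast _ _ (by omega)]
      exact hh j hj (by simp at hjl ⊢; omega)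
    · intro j hj hjl hpj h0
      exact absurd h0 (lt_irrefl 0)

theorem pvRoot_max (pq costs : List Int) (hh : pvIsHeap pq)
    (hperm : (pq.map (fun z => -z)).Perm costs) (hne : pq ≠ []) :
    (PySem.List.max? costs (fun x => x)).getD 0 = -(pq.getD 0 0) ∧ -(pq.getD 0 0) ∈ costs := by
  have hmemc : -(pq.getD 0 0) ∈ costs :=
    hperm.mem_iff.mp (List.mem_map.mpr ⟨pq.getD 0 0, pvGetD_zero_mem pq hne, rfl⟩)
  cases hmax : PySem.List.max? costs (fun x => x) with
  | none =>
    rw [PySem.List.max?_eq_none_iff] at hmax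
    rw [hmax] at hmemc
    simp at hmemc
  | some m =>
    have hm1 : m ∈ costs := PySem.List.max?_mem hmax
    have hm2 := PySem.List.max?_isMax hmax
    have h1 : -(pq.getD 0 0) ≤ m := hm2 _ hmemc
    have h2 : m ≤ -(pq.getD 0 0) := by
      have : m ∈ pq.map (fun z => -z) := hperm.symm.mem_iff.mp hm1
      obtain ⟨e, he, rfl⟩ := List.mem_map.mp this
      have := pvHeap_root_le_mem pq hh e he
      omega
    simp only [Option.getD_some]
    constructor
    · omega
    · exact hmemc

theorem pvLoop2_eq : ∀ (l : List (Int × Int)) (count curE : Int) (pq costs : List Int),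
    pvIsHeap pq → (pq.map (fun z => -z)).Perm costs →
    pvLoop2 l count curE pq = pvLoop2b l count curE costs
  | [], count, curE, pq, costs, _, _ => rfl
  | (d, g) :: rest, count, curE, pq, costs, hh, hperm => by
    simp only [pvLoop2, pvLoop2b]
    by_cases hE : curE ≥ d
    · rw [if_pos hE, if_pos hE]
      apply pvLoop2_eq rest _ _ _ _ (pvHeappush_isHeap pq (-(d-g)) hh)
      refine ((pvHeappush_perm pq (-(d-g))).map (fun z => -z)).trans ?_
      simp only [List.map_cons, neg_neg]
      exact (hperm.cons (d-g)).trans (List.perm_append_singleton _ _).symm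
    · rw [if_neg hE, if_neg hE]
      have hlen : pq.length = costs.length := by
        have := hperm.length_eq
        simpa using this
      by_cases hemp : pq.isEmpty
      · have hempc : costs.isEmpty = true := by
          rw [List.isEmpty_iff] at hemp ⊢
          rw [← List.length_eq_zero_iff, ← hlen, List.length_eq_zero_iff, hemp]
        rw [if_pos hemp, if_pos hempc]
        exact pvLoop2_eq rest _ _ _ _ hh hperm
      · have hempc : ¬ costs.isEmpty = true := by
          rw [List.isEmpty_iff] at hemp ⊢
          intro hc
          exact hemp (by rwa [← List.length_eq_zero_iff, ← hlen, List.length_eq_zero_iff] at hc)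
        rw [if_neg hemp, if_neg hempc]
        have hne : pq ≠ [] := by rwa [List.isEmpty_iff] at hemp
        obtain ⟨hmax, hmem⟩ := pvRoot_max pq costs hh hperm hne
        rw [hmax]
        by_cases h1 : -(pq.getD 0 0) > d - g
        · by_cases h2 : curE + -(pq.getD 0 0) ≥ d
          · rw [if_pos h1, if_pos h2, if_pos ⟨h1, h2⟩]
            rw [PySem.List.remove?_eq_some_erase costs (-(pq.getD 0 0)) hmem]
            simp only [Option.getD_some]
            apply pvLoop2_eq rest _ _ _ _
              (pvHeappush_isHeap _ _ (pvHeappopHeap_isHeap pq hh))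
            have htail : (pq.tail.map (fun z => -z)).Perm (costs.erase (-(pq.getD 0 0))) := by
              cases pq with
              | nil => exact absurd rfl hne
              | cons p0 t =>
                have herase : (costs.erase (-((p0 :: t).getD 0 0))).Perm
                    (((p0 :: t).map (fun z => -z)).erase (-((p0 :: t).getD 0 0))) :=
                  hperm.symm.erase _
                simp only [List.getD_cons_zero, List.map_cons, List.erase_cons_head] at herase
                simpa using herase.symm
            refine ((pvHeappush_perm _ _).map (fun z => -z)).trans ?_
            simp only [List.map_cons, neg_neg]
            refine (List.Perm.cons (d-g) (((pvHeappopHeap_perm pq hne).map _).trans htail)).trans ?_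
            exact (List.perm_append_singleton _ _).symm
          · rw [if_pos h1, if_neg h2, if_neg (by intro hc; exact h2 hc.2)]
            exact pvLoop2_eq rest _ _ _ _ hh hperm
        · rw [if_neg h1, if_neg (by intro hc; exact h1 hc.1)]
          exact pvLoop2_eq rest _ _ _ _ hh hperm

theorem pvLoop1_eq : ∀ (l : List (Int × Int)) (count curE : Int),
    pvLoop1 l (count, curE) = pvLoop1b l count curE
  | [], _, _ => rfl
  | (d, g) :: rest, count, curE => by
    simp only [pvLoop1, pvLoop1b]
    by_cases hE : curE ≥ d
    · rw [if_pos hE, if_neg (by omega)]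
      rw [show curE - d + g = curE + (g - d) by ring]
      exact pvLoop1_eq rest (count + 1) (curE + (g - d))
    · rw [if_neg hE, if_pos (by omega)]

theorem pvPartition_eq_aux : ∀ (tasks a b : List (Int × Int)),
    tasks.foldl (fun p t => if t.2 ≥ t.1 then (p.1 ++ [t], p.2) else (p.1, p.2 ++ [t])) (a, b)
      = (a ++ tasks.filter (fun t => t.2 ≥ t.1), b ++ tasks.filter (fun t => t.2 < t.1))
  | [], a, b => by simp
  | t :: rest, a, b => by
    simp only [List.foldl_cons, List.filter_cons]
    by_cases h : t.2 ≥ t.1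
    · rw [if_pos h]
      rw [pvPartition_eq_aux rest (a ++ [t]) b]
      simp [h, not_lt.mpr h]
    · rw [if_neg h]
      rw [pvPartition_eq_aux rest a (b ++ [t])]
      simp [h, not_le.mp h]

theorem pvPartition_eq (tasks : List (Int × Int)) :
    pvPartition tasks = (tasks.filter (fun t => t.2 ≥ t.1), tasks.filter (fun t => t.2 < t.1)) := by
  unfold pvPartition
  simpa using pvPartition_eq_aux tasks [] []

theorem solve_eq_alt (n E : Int) (tasks : List (Int × Int)) : solve n E tasks = solve_alt n E tasks := by
  unfold solve solve_alt
  rw [pvPartition_eq]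
  simp only []
  rw [pvLoop1_eq]
  apply pvLoop2_eq
  · intro j hj hlen
    simp at hlen
  · exact List.Perm.refl _

-- ===== VERDICT (by name: the statement is the Claim_ definition above) =====
theorem solve_spec : Claim_equal_solve := by
  intro n E tasks _
  unfold Spec_solve
  exact solve_eq_alt n E tasks
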